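-- pv_equiv track=rewrite | github.com/BreannaRoncal/CodeCademy-Projects | move_to_end.py | move_to_end
-- ===== SOURCE A (Python) =====
-- def move_to_end(lst, val):
--   result = []
--   if len(lst) == 0:
--     return result
--   curr_val = lst[0]
--
--   if curr_val == val:
--     result += move_to_end(lst[1:], val)
--     result.append(curr_val)
--     return result
--   else:
--     result.append(curr_val)
--     result += move_to_end(lst[1:], val)
--     return result
-- ===== SOURCE B (Python) =====
-- def move_to_end(lst, val):
--   others = []
--   count = 0
--   for x in lst:
--     if x == val:
--       count += 1
--     else:
--       others.append(x)
--   return others + [val] * count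
-- ===== Notes on version B (the rewrite author's own statement) =====
-- stated objective: faster
-- what changed: Replaces A's O(n^2) recursion (head-splitting with list slicing and concatenation at every level) by a single iterative pass that collects non-val elements and counts val occurrences, then appends count copies of val.
import Mathlib
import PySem

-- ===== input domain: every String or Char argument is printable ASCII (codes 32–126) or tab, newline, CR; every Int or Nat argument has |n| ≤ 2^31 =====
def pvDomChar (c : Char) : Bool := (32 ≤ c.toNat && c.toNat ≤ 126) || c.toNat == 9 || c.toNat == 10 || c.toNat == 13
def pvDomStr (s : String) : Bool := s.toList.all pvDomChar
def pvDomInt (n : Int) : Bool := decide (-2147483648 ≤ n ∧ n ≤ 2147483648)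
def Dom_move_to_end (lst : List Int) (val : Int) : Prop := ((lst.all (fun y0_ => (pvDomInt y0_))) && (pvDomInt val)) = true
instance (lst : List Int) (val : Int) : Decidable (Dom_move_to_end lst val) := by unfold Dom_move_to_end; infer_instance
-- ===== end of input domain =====

-- B replaces A's O(n^2) recursion by a single O(n) pass collecting non-val elements and counting val occurrences.


-- ===== PORT A =====
-- literal transliteration of A's recursion: empty check, head inspection, recurse on the tail slice,
-- append/prepend the head depending on whether it equals val
def move_to_end (lst : List Int) (val : Int) : List Int :=
  match lst with
  | [] => []
  | curr_val :: rest =>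
    if curr_val == val then
      move_to_end rest val ++ [curr_val]
    else
      curr_val :: move_to_end rest val

-- ===== PORT B =====
-- Source B's single pass: fold accumulating (others, count), then others ++ count copies of val
def move_to_end_alt (lst : List Int) (val : Int) : List Int :=
  let st := lst.foldl (fun (s : List Int × Nat) x =>
    if x == val then (s.1, s.2 + 1) else (s.1 ++ [x], s.2)) ([], 0)
  st.1 ++ List.replicate st.2 val

-- ===== PRECONDITION & SPEC =====
def Spec_move_to_end (lst : List Int) (val : Int) (out : List Int) : Prop := out = move_to_end_alt lst val
instance (lst : List Int) (val : Int) (out : List Int) : Decidable (Spec_move_to_end lst val out) := by unfold Spec_move_to_end; infer_instance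

-- ===== CLAIM (what is proved, stated in full; the proofs are below) =====
def Claim_equal_move_to_end : Prop := ∀ (lst : List Int) (val : Int), Dom_move_to_end lst val → Spec_move_to_end lst val (move_to_end lst val)

-- ===== LEMMAS AND PROOFS =====

-- B's fold from an arbitrary accumulator: appends the non-val elements, adds the val count
theorem pv_foldl_char (lst : List Int) (val : Int) (acc : List Int) (c : Nat) :
    lst.foldl (fun (s : List Int × Nat) x =>
      if x == val then (s.1, s.2 + 1) else (s.1 ++ [x], s.2)) (acc, c)
    = (acc ++ lst.filter (fun x => x ≠ val), c + lst.count val) := by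
  induction lst generalizing acc c with
  | nil => simp
  | cons h t ih =>
    by_cases hv : h = val
    · subst hv
      simp only [List.foldl, if_pos (beq_self_eq_true _)]
      rw [ih]
      simp
      omega
    · have hb : (h == val) = false := by simp [hv]
      simp only [List.foldl, hb, Bool.false_eq_true, if_false]
      rw [ih]
      simp [hv, List.append_assoc]

-- A's recursion computes: non-val elements in order, then count-many copies of val
theorem pv_A_char (lst : List Int) (val : Int) :
    move_to_end lst val = lst.filter (fun x => x ≠ val) ++ List.replicate (lst.count val) val := by
  induction lst with
  | nil => simp [move_to_end]
  | cons h t ih =>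
    by_cases hv : h = val
    · subst hv
      simp only [move_to_end, if_pos (beq_self_eq_true _), ih, List.count_cons_self]
      rw [List.append_assoc, ← List.replicate_succ']
      simp
    · have hb : (h == val) = false := by simp [hv]
      simp only [move_to_end, hb, Bool.false_eq_true, if_false, ih]
      simp [hv]

-- ===== VERDICT (by name: the statement is the Claim_ definition above) =====
theorem move_to_end_spec : Claim_equal_move_to_end := by
  intro lst val _
  unfold Spec_move_to_end move_to_end_alt
  rw [pv_foldl_char, pv_A_char]
  simp
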